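-- pv_equiv track=rewrite | github.com/MrBrantCode/unitest_baseline | mut_generate/mist_train_cf/cf_6147/solution.py | add_one_recursive
-- ===== SOURCE A (Python) =====
-- def add_one_recursive(lst):
--     """
--     Recursively increments each integer in a list by 1 and returns a new sorted list in ascending order.
--
--     Args:
--     lst (list): A list of integers.
--
--     Returns:
--     list: A new sorted list with each integer incremented by 1.
--     """
--
--     def merge(left, right):
--         """
--         Merges two sorted lists into one sorted list.
--
--         Args:
--         left (list): The first sorted list.
--         right (list): The second sorted list.
--
--         Returns:
--         list: The merged sorted list.
--         """
--         result = []
--         i = 0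
--         j = 0
--         while i < len(left) and j < len(right):
--             if left[i] < right[j]:
--                 result.append(left[i])
--                 i += 1
--             else:
--                 result.append(right[j])
--                 j += 1
--         result.extend(left[i:])
--         result.extend(right[j:])
--         return result
--
--     if len(lst) == 0:
--         return []
--     elif len(lst) == 1:
--         return [lst[0] + 1]
--     else:
--         mid = len(lst) // 2
--         left = add_one_recursive(lst[:mid])
--         right = add_one_recursive(lst[mid:])
--         return merge(left, right)
-- ===== SOURCE B (Python) =====
-- def add_one_recursive(lst):
--     """Increment each integer by 1 and return a new sorted list (ascending)."""
--     return sorted(x + 1 for x in lst)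
-- ===== Notes on version B (the rewrite author's own statement) =====
-- stated objective: simpler
-- what changed: Replaces the hand-rolled recursive merge sort with index-based merging by a single expression that increments each element and sorts with the builtin sort.
import Mathlib
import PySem

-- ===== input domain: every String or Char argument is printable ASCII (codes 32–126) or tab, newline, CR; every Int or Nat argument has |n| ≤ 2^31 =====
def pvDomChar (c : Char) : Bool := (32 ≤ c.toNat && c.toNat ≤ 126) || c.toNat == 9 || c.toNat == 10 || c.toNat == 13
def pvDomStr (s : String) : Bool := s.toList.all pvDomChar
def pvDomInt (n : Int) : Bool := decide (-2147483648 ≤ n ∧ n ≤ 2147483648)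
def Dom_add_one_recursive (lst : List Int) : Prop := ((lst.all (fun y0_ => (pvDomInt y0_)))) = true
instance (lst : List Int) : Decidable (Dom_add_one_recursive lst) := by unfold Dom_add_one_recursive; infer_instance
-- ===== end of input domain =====

-- B replaces A's hand-rolled recursive merge sort by incrementing each element and
-- calling the builtin sort (objective: simpler).

-- ===== PORT A =====
-- the 'while i < len(left) and j < len(right)' merge loop of A, with its two index
-- counters and the growing 'result'; the trailing 'result.extend(left[i:]); result.extend(right[j:])'
-- is the else branch (left[i:] on a nonnegative in-range index is List.drop, exact by
-- PySem.List.slice_from_natCast)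
def pvMergeLoop (left right : List Int) (i j : Nat) (result : List Int) : List Int :=
  if h : i < left.length ∧ j < right.length then
    if left[i] < right[j] then
      pvMergeLoop left right (i + 1) j (result ++ [left[i]])
    else
      pvMergeLoop left right i (j + 1) (result ++ [right[j]])
  else
    result ++ left.drop i ++ right.drop j
termination_by (left.length - i) + (right.length - j)
decreasing_by
  · exact Nat.add_lt_add_right (Nat.sub_succ_lt_self _ _ h.1) _
  · exact Nat.add_lt_add_left (Nat.sub_succ_lt_self _ _ h.2) _

-- A's helper 'merge(left, right)': result = [], i = 0, j = 0, then the loop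
def pvMerge (left right : List Int) : List Int := pvMergeLoop left right 0 0 []

-- A: len checks, then mid = len(lst)//2 (nonnegative, so Nat division is exact),
-- lst[:mid]/lst[mid:] = take/drop (PySem.List.slice_to_natCast/slice_from_natCast),
-- recurse on both halves and merge; lst[0] on the singleton branch is lst.headI
def add_one_recursive (lst : List Int) : List Int :=
  if _h0 : lst.length = 0 then []
  else if _h1 : lst.length = 1 then [lst.headI + 1]
  else
    let mid := lst.length / 2
    pvMerge (add_one_recursive (lst.take mid)) (add_one_recursive (lst.drop mid))
termination_by lst.length
decreasing_by
  · exact lt_of_le_of_lt (List.length_take_le _ _)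
      (Nat.div_lt_self (Nat.pos_of_ne_zero _h0) Nat.one_lt_two)
  · exact List.length_drop ▸
      Nat.sub_lt (Nat.pos_of_ne_zero _h0)
        (Nat.div_pos (Nat.lt_of_le_of_ne (Nat.one_le_iff_ne_zero.mpr _h0) (fun e => _h1 e.symm)) Nat.zero_lt_two)

-- ===== PORT B =====
-- Source B: sorted(x + 1 for x in lst)
def add_one_recursive_alt (lst : List Int) : List Int :=
  PySem.List.sorted (lst.map (fun x => x + 1)) (fun x => x) false

-- ===== PRECONDITION & SPEC =====
def Spec_add_one_recursive (lst : List Int) (out : List Int) : Prop := out = add_one_recursive_alt lst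
instance (lst : List Int) (out : List Int) : Decidable (Spec_add_one_recursive lst out) := by unfold Spec_add_one_recursive; infer_instance

-- ===== CLAIM (what is proved, stated in full; the proofs are below) =====
def Claim_equal_add_one_recursive : Prop := ∀ (lst : List Int), Dom_add_one_recursive lst → Spec_add_one_recursive lst (add_one_recursive lst)

-- ===== LEMMAS AND PROOFS =====

-- clean structural two-list merge, used only to characterise pvMergeLoop
def pvMergeRec : List Int → List Int → List Int
  | [], r => r
  | a :: l, [] => a :: l
  | a :: l, b :: r => if a < b then a :: pvMergeRec l (b :: r) else b :: pvMergeRec (a :: l) r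

theorem pvMergeRec_nil_right (l : List Int) : pvMergeRec l [] = l := by
  cases l <;> simp [pvMergeRec]

theorem pvMergeRec_perm (l r : List Int) : (pvMergeRec l r).Perm (l ++ r) := by
  induction l generalizing r with
  | nil => simp [pvMergeRec]
  | cons a l ih =>
    induction r with
    | nil => simp [pvMergeRec]
    | cons b r ihr =>
      simp only [pvMergeRec]
      split
      · exact (ih (b :: r)).cons a
      · have h1 : (b :: pvMergeRec (a :: l) r).Perm (b :: (a :: l ++ r)) := ihr.cons b
        have h2 : (b :: (a :: l ++ r)).Perm (a :: b :: (l ++ r)) := List.Perm.swap a b (l ++ r)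
        have h3 : (b :: (l ++ r)).Perm (l ++ b :: r) := List.perm_middle.symm
        exact h1.trans (h2.trans (h3.cons a))

theorem pvMergeRec_pairwise {l r : List Int}
    (hl : l.Pairwise (· ≤ ·)) (hr : r.Pairwise (· ≤ ·)) :
    (pvMergeRec l r).Pairwise (· ≤ ·) := by
  induction l generalizing r with
  | nil => simpa [pvMergeRec] using hr
  | cons a l ih =>
    induction r with
    | nil => simpa [pvMergeRec] using hl
    | cons b r ihr =>
      simp only [pvMergeRec]
      rcases List.pairwise_cons.mp hl with ⟨ha, hl'⟩
      rcases List.pairwise_cons.mp hr with ⟨hb, hr'⟩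
      split
      · rename_i hab
        refine List.pairwise_cons.mpr ⟨?_, ih hl' hr⟩
        intro x hx
        have hx' : x ∈ l ++ b :: r := (pvMergeRec_perm l (b :: r)).mem_iff.mp hx
        rcases List.mem_append.mp hx' with h | h
        · exact ha x h
        · rcases List.mem_cons.mp h with h | h
          · omega
          · have := hb x h; omega
      · rename_i hab
        refine List.pairwise_cons.mpr ⟨?_, ihr hr'⟩
        intro x hx
        have hx' : x ∈ (a :: l) ++ r := (pvMergeRec_perm (a :: l) r).mem_iff.mp hx
        rcases List.mem_append.mp hx' with h | h
        · rcases List.mem_cons.mp h with h | h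
          · omega
          · have := ha x h; omega
        · exact hb x h

-- the index loop computes result ++ (structural merge of the remaining suffixes)
theorem pvMergeLoop_eq (left right : List Int) (i j : Nat) (result : List Int) :
    pvMergeLoop left right i j result = result ++ pvMergeRec (left.drop i) (right.drop j) := by
  induction i, j, result using pvMergeLoop.induct (left := left) (right := right) with
  | case1 i j result h hlt ih =>
    rw [pvMergeLoop]
    simp only [h, and_self, dite_true, if_pos hlt]
    rw [ih]
    have hdl : left.drop i = left[i] :: left.drop (i + 1) :=
      (List.drop_eq_getElem_cons h.1).trans rfl
    have hdr : right.drop j = right[j] :: right.drop (j + 1) :=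
      (List.drop_eq_getElem_cons h.2).trans rfl
    rw [hdl, hdr, pvMergeRec, if_pos hlt]
    simp
  | case2 i j result h hlt ih =>
    rw [pvMergeLoop]
    simp only [h, and_self, dite_true, if_neg hlt]
    rw [ih]
    have hdl : left.drop i = left[i] :: left.drop (i + 1) :=
      (List.drop_eq_getElem_cons h.1).trans rfl
    have hdr : right.drop j = right[j] :: right.drop (j + 1) :=
      (List.drop_eq_getElem_cons h.2).trans rfl
    rw [hdl, hdr, pvMergeRec, if_neg hlt]
    simp
  | case3 i j result h =>
    rw [pvMergeLoop, dif_neg h]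
    rcases Nat.lt_or_ge i left.length with hi | hi
    · have hj : ¬ j < right.length := fun hj => h ⟨hi, hj⟩
      rw [show right.drop j = [] from List.drop_eq_nil_of_le (by omega),
        pvMergeRec_nil_right]
      simp
    · rw [show left.drop i = [] from List.drop_eq_nil_of_le hi]
      simp [pvMergeRec]

theorem pvMerge_eq (left right : List Int) : pvMerge left right = pvMergeRec left right := by
  simpa using pvMergeLoop_eq left right 0 0 []

-- A produces a weakly increasing rearrangement of (x+1 for x in lst)
theorem add_one_recursive_char (lst : List Int) :
    (add_one_recursive lst).Perm (lst.map (fun x => x + 1)) ∧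
      (add_one_recursive lst).Pairwise (· ≤ ·) := by
  induction lst using add_one_recursive.induct with
  | case1 lst h0 =>
    have : lst = [] := List.eq_nil_of_length_eq_zero h0
    subst this
    simp [add_one_recursive]
  | case2 lst h0 h1 =>
    rcases List.length_eq_one_iff.mp h1 with ⟨x, rfl⟩
    simp [add_one_recursive]
  | case3 lst h0 h1 mid ih1 ih2 =>
    rw [add_one_recursive, dif_neg h0, dif_neg h1]
    simp only
    rw [pvMerge_eq]
    constructor
    · have h1 := pvMergeRec_perm (add_one_recursive (lst.take mid)) (add_one_recursive (lst.drop mid))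
      have h2 := ih1.1.append ih2.1
      have h3 : (lst.take mid).map (fun x => x + 1) ++ (lst.drop mid).map (fun x => x + 1)
          = lst.map (fun x => x + 1) := by
        rw [← List.map_append, List.take_append_drop]
      exact (h1.trans h2).trans (h3 ▸ List.Perm.refl _)
    · exact pvMergeRec_pairwise ih1.2 ih2.2

-- ===== VERDICT (by name: the statement is the Claim_ definition above) =====
theorem add_one_recursive_spec : Claim_equal_add_one_recursive := by
  intro lst _
  unfold Spec_add_one_recursive add_one_recursive_alt
  obtain ⟨hperm, hpw⟩ := add_one_recursive_char lst
  exact (PySem.List.sorted_id_eq_of_perm_of_pairwise _ _ hperm hpw).symm
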